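-- pv_equiv track=rewrite | github.com/animallibraryn4/animeheaven-downloader | plugins/helper.py | get_episodes
-- ===== SOURCE A (Python) =====
-- def get_episodes(ep: str) -> list:
--     """Parse episode range string into list of episodes"""
--     try:
--         episodes = []
--
--         # Handle comma-separated episodes
--         if ',' in ep:
--             parts = ep.split(',')
--             for part in parts:
--                 if '-' in part:
--                     start, end = map(int, part.split('-'))
--                     episodes.extend(range(start, end + 1))
--                 else:
--                     episodes.append(int(part))
--         # Handle range
--         elif '-' in ep:
--             start, end = map(int, ep.split('-'))
--             episodes = list(range(start, end + 1))
--         # Single episode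
--         else:
--             episodes = [int(ep)]
--
--         # Remove duplicates and sort
--         episodes = sorted(set(episodes))
--         return episodes if episodes else []
--
--     except ValueError:
--         return []
-- ===== SOURCE B (Python) =====
-- def _scan_segment(s):
--     """Consume the first comma-delimited segment of s char by char, splitting it
--     at its first '-' into left/right and flagging any further '-'; returns also
--     the text after the comma (None when no comma remains)."""
--     left, right, bad = '', None, False
--     k = 0
--     while k < len(s) and s[k] != ',':
--         c = s[k]
--         if c == '-':
--             if right is None:
--                 right = ''
--             else:
--                 bad = True
--         elif right is None:
--             left += c
--         else:
--             right += c
--         k += 1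
--     rest = s[k + 1:] if k < len(s) else None
--     return left, right, bad, rest
--
--
-- def get_episodes(ep: str) -> list:
--     """Parse episode range string into list of episodes"""
--     eps = set()
--     rest = ep
--     while rest is not None:
--         left, right, bad, rest = _scan_segment(rest)
--         if bad:
--             return []
--         try:
--             if right is None:
--                 eps.add(int(left))
--             else:
--                 lo, hi = int(left), int(right)
--                 while lo <= hi:
--                     eps.add(lo)
--                     lo += 1
--         except ValueError:
--             return []
--     return sorted(eps)
-- ===== Notes on version B (the rewrite author's own statement) =====
-- stated objective: alternative
-- what changed: Replaces A's split-based three-way branch (split on comma, per part split on dash, range(), set()+sorted at the end) by a single character-level scanner that walks the string once with left/right/bad accumulator state and a comma cursor, expands each range with an explicit counting loop into an incrementally maintained set, and returns [] as soon as a malformed segment or unparsable number is seen instead of a global try/except.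
import Mathlib
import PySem

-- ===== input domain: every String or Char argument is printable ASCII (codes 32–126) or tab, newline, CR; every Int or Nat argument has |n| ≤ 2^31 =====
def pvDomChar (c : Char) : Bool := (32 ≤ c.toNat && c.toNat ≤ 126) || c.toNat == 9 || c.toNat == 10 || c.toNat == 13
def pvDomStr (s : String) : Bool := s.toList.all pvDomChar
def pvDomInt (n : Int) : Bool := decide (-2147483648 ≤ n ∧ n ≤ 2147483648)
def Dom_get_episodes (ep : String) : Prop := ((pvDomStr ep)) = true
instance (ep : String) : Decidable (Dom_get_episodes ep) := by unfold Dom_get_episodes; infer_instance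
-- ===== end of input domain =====

-- B replaces A's split-based three-way branch by a single character-level scanner
-- with left/right/bad state, an explicit range-expansion loop and an incrementally
-- maintained set (objective: alternative).

-- ===== PORT A =====
-- start, end = map(int, part.split('-')); range(start, end+1).  none = ValueError
-- (wrong number of pieces, or a piece int() rejects).
def pvParseRangeA (part : List Char) : Option (List Int) :=
  match PySem.Chars.splitOn part ['-'] with
  | [a, b] =>
    match PySem.Int.ofChars? a, PySem.Int.ofChars? b with
    | some s, some e => some (PySem.List.pyRange s (e + 1) 1)
    | _, _ => none
  | _ => none

-- the 'for part in parts' loop of A's comma branch; none = a ValueError escaped the loop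
def pvEpLoopA : List (List Char) → List Int → Option (List Int)
  | [], acc => some acc
  | part :: rest, acc =>
    if PySem.Chars.isIn ['-'] part then
      match pvParseRangeA part with
      | some r => pvEpLoopA rest (acc ++ r)
      | none => none
    else
      match PySem.Int.ofChars? part with
      | some n => pvEpLoopA rest (acc ++ [n])
      | none => none

def get_episodes (ep : String) : List Int :=
  -- try: … except ValueError: return []  is modelled by Option; none ⇒ []
  let episodes? : Option (List Int) :=
    if PySem.Chars.isIn [','] ep.toList then
      pvEpLoopA (PySem.Chars.splitOn ep.toList [',']) []
    else if PySem.Chars.isIn ['-'] ep.toList then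
      pvParseRangeA ep.toList
    else
      (PySem.Int.ofChars? ep.toList).map (fun n => [n])
  match episodes? with
  | none => []
  | some l =>
    let sortedUniq := PySem.List.sorted (PySem.Set.ofList l) (fun x => x) false
    if sortedUniq.isEmpty then [] else sortedUniq

-- ===== PORT B =====
-- _scan_segment's while loop: walk the chars of the first comma-delimited segment,
-- accumulating left / right around the first '-', flagging a second '-' as bad;
-- fourth component = the text after the comma (none when no comma remains).
def pvSegScan : List Char → List Char → Option (List Char) → Bool →
    (List Char × Option (List Char) × Bool × Option (List Char))
  | [], left, right, bad => (left, right, bad, none)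
  | c :: t, left, right, bad =>
    if c = ',' then (left, right, bad, some t)
    else if c = '-' then
      match right with
      | none => pvSegScan t left (some []) bad
      | some r => pvSegScan t left (some r) true
    else
      match right with
      | none => pvSegScan t (left ++ [c]) right bad
      | some r => pvSegScan t left (some (r ++ [c])) bad

-- termination of B's outer while: the remainder after a comma is shorter
theorem pvSegScan_rem_lt : ∀ (s left : List Char) (right : Option (List Char)) (bad : Bool)
    (t : List Char), (pvSegScan s left right bad).2.2.2 = some t → t.length < s.length := by
  intro s
  induction s with
  | nil => intro left right bad t h; simp [pvSegScan] at h
  | cons c rest ih =>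
    intro left right bad t h
    by_cases hc : c = ','
    · simp [pvSegScan, hc] at h
      subst h; simp
    · cases right with
      | none =>
        by_cases hd : c = '-'
        · simp [pvSegScan, hd] at h
          exact Nat.lt_succ_of_lt (ih _ _ _ _ h)
        · simp [pvSegScan, hc, hd] at h
          exact Nat.lt_succ_of_lt (ih _ _ _ _ h)
      | some r =>
        by_cases hd : c = '-'
        · simp [pvSegScan, hd] at h
          exact Nat.lt_succ_of_lt (ih _ _ _ _ h)
        · simp [pvSegScan, hc, hd] at h
          exact Nat.lt_succ_of_lt (ih _ _ _ _ h)

-- 'while lo <= hi: eps.add(lo); lo += 1'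
def pvAddRange (eps : PySem.Set Int) (lo hi : Int) : PySem.Set Int :=
  if lo ≤ hi then pvAddRange (PySem.Set.add eps lo) (lo + 1) hi else eps
termination_by (hi + 1 - lo).toNat
decreasing_by omega

-- B's outer 'while rest is not None' loop; none = return [] (bad segment / ValueError)
def pvLoopB (s : List Char) (eps : PySem.Set Int) : Option (PySem.Set Int) :=
  match h : pvSegScan s [] none false with
  | (left, right, bad, rem) =>
    if bad then none
    else
      let eps? : Option (PySem.Set Int) :=
        match right with
        | none => (PySem.Int.ofChars? left).map (fun n => PySem.Set.add eps n)
        | some r =>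
          match PySem.Int.ofChars? left, PySem.Int.ofChars? r with
          | some lo, some hi => some (pvAddRange eps lo hi)
          | _, _ => none
      match eps? with
      | none => none
      | some e =>
        match rem with
        | none => some e
        | some t => pvLoopB t e
termination_by s.length
decreasing_by
  exact pvSegScan_rem_lt s [] none false t (by rw [h])

def get_episodes_alt (ep : String) : List Int :=
  match pvLoopB ep.toList PySem.Set.empty with
  | none => []
  | some eps => PySem.List.sorted eps (fun x => x) false

-- ===== PRECONDITION & SPEC =====
def Spec_get_episodes (ep : String) (out : List Int) : Prop := out = get_episodes_alt ep
instance (ep : String) (out : List Int) : Decidable (Spec_get_episodes ep out) := by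
  unfold Spec_get_episodes; infer_instance

-- ===== CLAIM (what is proved, stated in full; the proofs are below) =====
def Claim_equal_get_episodes : Prop := ∀ (ep : String), Dom_get_episodes ep → Spec_get_episodes ep (get_episodes ep)

-- ===== LEMMAS AND PROOFS =====

-- single-character membership form of the substring test
lemma isIn_singleton (c : Char) (s : List Char) :
    PySem.Chars.isIn [c] s = true ↔ c ∈ s := by
  rw [PySem.Chars.isIn_iff_infix]
  constructor
  · intro h; exact (List.singleton_sublist).1 (List.IsInfix.sublist h)
  · intro h
    obtain ⟨p, t, rfl⟩ := List.append_of_mem h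
    exact ⟨p, t, by simp⟩

-- first-occurrence decomposition of a list at a character
lemma exists_first_split {c : Char} {s : List Char} (h : c ∈ s) :
    ∃ p t, s = p ++ c :: t ∧ c ∉ p := by
  induction s with
  | nil => cases h
  | cons a rest ih =>
    by_cases hac : a = c
    · exact ⟨[], rest, by simp [hac], by simp⟩
    · have : c ∈ rest := by
        cases List.mem_cons.1 h with
        | inl h' => exact absurd h'.symm hac
        | inr h' => exact h'
      obtain ⟨p, t, rfl, hp⟩ := ih this
      refine ⟨a :: p, t, rfl, ?_⟩
      intro hmem
      rcases List.mem_cons.1 hmem with h' | h'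
      · exact hac h'.symm
      · exact hp h'

-- splitOn of a separator-free list
lemma splitOn_go_no_occ (c : Char) (fuel : Nat) :
    ∀ (l cur : List Char) (acc : List (List Char)), c ∉ l →
      PySem.Chars.splitOn.go [c] fuel l cur acc = acc.reverse ++ [cur.reverse ++ l] := by
  induction fuel with
  | zero => intro l cur acc _; simp [PySem.Chars.splitOn.go]
  | succ fuel ih =>
    intro l cur acc h
    cases l with
    | nil => simp [PySem.Chars.splitOn.go]
    | cons a rest =>
      have hne : ¬ (c = a) := fun e => h (by simp [e])
      have hrest : c ∉ rest := fun e => h (by simp [e])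
      have hpf : ([c].isPrefixOf (a :: rest)) = false := by
        simp [List.isPrefixOf, hne]
      simp [PySem.Chars.splitOn.go, hpf, ih rest (a :: cur) acc hrest]

lemma splitOn_no_occ (s : List Char) (c : Char) (h : c ∉ s) :
    PySem.Chars.splitOn s [c] = [s] := by
  simpa using splitOn_go_no_occ c (s.length + 1) s [] [] h

-- accumulator form of splitOn.go
lemma splitOn_go_acc (c : Char) (fuel : Nat) :
    ∀ (l cur : List Char) (acc : List (List Char)),
      PySem.Chars.splitOn.go [c] fuel l cur acc =
        acc.reverse ++ PySem.Chars.splitOn.go [c] fuel l cur [] := by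
  induction fuel with
  | zero => intro l cur acc; simp [PySem.Chars.splitOn.go]
  | succ fuel ih =>
    intro l cur acc
    cases l with
    | nil => simp [PySem.Chars.splitOn.go]
    | cons a rest =>
      by_cases hpf : ([c].isPrefixOf (a :: rest)) = true
      · simp only [PySem.Chars.splitOn.go, hpf, if_true]
        rw [ih _ _ (cur.reverse :: acc), ih _ _ [cur.reverse]]
        simp
      · simp only [PySem.Chars.splitOn.go, hpf, if_false, Bool.false_eq_true]
        exact ih rest (a :: cur) acc

lemma splitOn_go_occ (c : Char) :
    ∀ (p : List Char) (fuel : Nat) (t cur : List Char) (acc : List (List Char)), c ∉ p →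
      PySem.Chars.splitOn.go [c] (p.length + fuel + 1) (p ++ c :: t) cur acc =
        PySem.Chars.splitOn.go [c] fuel t [] ((cur.reverse ++ p) :: acc) := by
  intro p
  induction p with
  | nil =>
    intro fuel t cur acc _
    have hpf : ([c].isPrefixOf (c :: t)) = true := by simp [List.isPrefixOf]
    simp [PySem.Chars.splitOn.go, hpf]
  | cons a p ih =>
    intro fuel t cur acc h
    have hne : ¬ (c = a) := fun e => h (by simp [e])
    have hp : c ∉ p := fun e => h (by simp [e])
    have hpf : ([c].isPrefixOf (a :: (p ++ c :: t))) = false := by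
      simp [List.isPrefixOf, hne]
    have : (a :: p).length + fuel + 1 = (p.length + fuel + 1) + 1 := by simp; omega
    rw [this]
    simp only [List.cons_append, PySem.Chars.splitOn.go, hpf, Bool.false_eq_true, if_false]
    rw [ih fuel t (a :: cur) acc hp]
    simp

lemma splitOn_cons_occ (c : Char) (p t : List Char) (hp : c ∉ p) :
    PySem.Chars.splitOn (p ++ c :: t) [c] = p :: PySem.Chars.splitOn t [c] := by
  show PySem.Chars.splitOn.go [c] ((p ++ c :: t).length + 1) (p ++ c :: t) [] [] = _
  have hlen : (p ++ c :: t).length + 1 = p.length + (t.length + 1) + 1 := by simp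
  rw [hlen, splitOn_go_occ c p (t.length + 1) t [] [] hp, splitOn_go_acc]
  simp [PySem.Chars.splitOn]

lemma splitOn_ne_nil (s : List Char) (c : Char) : PySem.Chars.splitOn s [c] ≠ [] := by
  by_cases h : c ∈ s
  · obtain ⟨p, t, rfl, hp⟩ := exists_first_split h
    rw [splitOn_cons_occ c p t hp]; simp
  · rw [splitOn_no_occ s c h]; simp

lemma splitOn_two_le (s : List Char) (c : Char) (h : c ∈ s) :
    2 ≤ (PySem.Chars.splitOn s [c]).length := by
  obtain ⟨p, t, rfl, hp⟩ := exists_first_split h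
  rw [splitOn_cons_occ c p t hp]
  have := splitOn_ne_nil t c
  cases hst : PySem.Chars.splitOn t [c] with
  | nil => exact absurd hst this
  | cons x xs => simp

-- ========== scanner characterization ==========

lemma scan_comma (t left : List Char) (right : Option (List Char)) (bad : Bool) :
    pvSegScan (',' :: t) left right bad = (left, right, bad, some t) := by
  simp [pvSegScan]

lemma scan_plain_left : ∀ (p s left : List Char) (bad : Bool), ',' ∉ p → '-' ∉ p →
    pvSegScan (p ++ s) left none bad = pvSegScan s (left ++ p) none bad := by
  intro p
  induction p with
  | nil => intro s left bad _ _; simp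
  | cons a p ih =>
    intro s left bad h1 h2
    have ha1 : ¬ (a = ',') := fun e => h1 (by simp [e])
    have ha2 : ¬ (a = '-') := fun e => h2 (by simp [e])
    have hp1 : ',' ∉ p := fun e => h1 (by simp [e])
    have hp2 : '-' ∉ p := fun e => h2 (by simp [e])
    simp only [List.cons_append, pvSegScan, ha1, ha2, if_false]
    rw [ih s (left ++ [a]) bad hp1 hp2]
    simp

lemma scan_plain_right : ∀ (p s left r : List Char) (bad : Bool), ',' ∉ p → '-' ∉ p →
    pvSegScan (p ++ s) left (some r) bad = pvSegScan s left (some (r ++ p)) bad := by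
  intro p
  induction p with
  | nil => intro s left r bad _ _; simp
  | cons a p ih =>
    intro s left r bad h1 h2
    have ha1 : ¬ (a = ',') := fun e => h1 (by simp [e])
    have ha2 : ¬ (a = '-') := fun e => h2 (by simp [e])
    have hp1 : ',' ∉ p := fun e => h1 (by simp [e])
    have hp2 : '-' ∉ p := fun e => h2 (by simp [e])
    simp only [List.cons_append, pvSegScan, ha1, ha2, if_false]
    rw [ih s left (r ++ [a]) bad hp1 hp2]
    simp

-- where the text after the first comma starts (abstractly: the scanner's remainder)
def pvRem : List Char → Option (List Char)
  | [] => none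
  | c :: t => if c = ',' then some t else pvRem t

lemma scan_bad : ∀ (s left : List Char) (right : Option (List Char)),
    (pvSegScan s left right true).2.2.1 = true := by
  intro s
  induction s with
  | nil => intro left right; simp [pvSegScan]
  | cons a t ih =>
    intro left right
    by_cases hc : a = ','
    · simp [pvSegScan, hc]
    · by_cases hd : a = '-'
      · cases right with
        | none => simp [pvSegScan, hd, ih]
        | some r => simp [pvSegScan, hd, ih]
      · cases right with
        | none => simp [pvSegScan, hc, hd, ih]
        | some r => simp [pvSegScan, hc, hd, ih]

lemma addRange_eq_foldl_aux : ∀ (n : Nat) (lo hi : Int), (hi + 1 - lo).toNat = n →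
    ∀ (eps : PySem.Set Int),
      pvAddRange eps lo hi = (PySem.List.pyRange lo (hi + 1) 1).foldl PySem.Set.add eps := by
  intro n
  induction n with
  | zero =>
    intro lo hi hn eps
    have hle : hi < lo := by omega
    rw [pvAddRange, if_neg (by omega), PySem.List.pyRange_one_eq_nil (by omega)]
    rfl
  | succ n ih =>
    intro lo hi hn eps
    have hlt : lo ≤ hi := by omega
    rw [pvAddRange, if_pos hlt, PySem.List.pyRange_one_cons (by omega)]
    rw [ih (lo + 1) hi (by omega) (PySem.Set.add eps lo)]
    rfl

lemma addRange_eq_foldl (lo hi : Int) (eps : PySem.Set Int) :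
    pvAddRange eps lo hi = (PySem.List.pyRange lo (hi + 1) 1).foldl PySem.Set.add eps :=
  addRange_eq_foldl_aux (hi + 1 - lo).toNat lo hi rfl eps

-- ========== B's segment value = A's per-part parse ==========

-- A's per-part result (the body of A's comma-loop), used as the common middle form
def pvPartVal (part : List Char) : Option (List Int) :=
  if PySem.Chars.isIn ['-'] part then pvParseRangeA part
  else (PySem.Int.ofChars? part).map (fun n => [n])

lemma parseRangeA_one_dash (a b : List Char) (ha : '-' ∉ a) (hb : '-' ∉ b) :
    pvParseRangeA (a ++ '-' :: b) =
      (match PySem.Int.ofChars? a, PySem.Int.ofChars? b with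
       | some s, some e => some (PySem.List.pyRange s (e + 1) 1)
       | _, _ => none) := by
  rw [pvParseRangeA, splitOn_cons_occ '-' a b ha, splitOn_no_occ b '-' hb]

lemma parseRangeA_two_dash (a b : List Char) (ha : '-' ∉ a) (hb : '-' ∈ b) :
    pvParseRangeA (a ++ '-' :: b) = none := by
  rw [pvParseRangeA, splitOn_cons_occ '-' a b ha]
  have h2 := splitOn_two_le b '-' hb
  cases hsp : PySem.Chars.splitOn b ['-'] with
  | nil => simp_all
  | cons x xs =>
    cases hxs : xs with
    | nil => simp_all
    | cons y ys => rfl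

lemma partVal_no_dash (p : List Char) (h : '-' ∉ p) :
    pvPartVal p = (PySem.Int.ofChars? p).map (fun n => [n]) := by
  have : PySem.Chars.isIn ['-'] p = false := by
    rw [← Bool.not_eq_true, isIn_singleton]; exact h
  simp [pvPartVal, this]

lemma partVal_dash (p : List Char) (h : '-' ∈ p) :
    pvPartVal p = pvParseRangeA p := by
  have : PySem.Chars.isIn ['-'] p = true := (isIn_singleton _ _).2 h
  simp [pvPartVal, this]

-- ========== pvLoopB stepping and the middle form on the B side ==========

lemma loopB_step (s : List Char) (eps : PySem.Set Int) (left : List Char)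
    (right : Option (List Char)) (bad : Bool) (rem : Option (List Char))
    (hscan : pvSegScan s [] none false = (left, right, bad, rem)) :
    pvLoopB s eps =
      if bad then none
      else
        match (match right with
               | none => (PySem.Int.ofChars? left).map (fun n => PySem.Set.add eps n)
               | some r =>
                 match PySem.Int.ofChars? left, PySem.Int.ofChars? r with
                 | some lo, some hi => some (pvAddRange eps lo hi)
                 | _, _ => none) with
        | none => none
        | some e =>
          match rem with
          | none => some e
          | some t => pvLoopB t e := by
  rw [pvLoopB]
  split
  next left' right' bad' rem' h =>
    rw [hscan] at h
    injection h with h1 h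
    injection h with h2 h
    injection h with h3 h4
    subst h1; subst h2; subst h3; subst h4
    cases bad with
    | true => rfl
    | false =>
      cases right with
      | none => cases rem <;> rfl
      | some r => cases rem <;> rfl

-- the common middle form: per-part parses, any-failure, flattened fold into the set
def pvRhsB (s : List Char) (eps : PySem.Set Int) : Option (PySem.Set Int) :=
  if ((PySem.Chars.splitOn s [',']).map pvPartVal).any Option.isNone then none
  else some (((((PySem.Chars.splitOn s [',']).map pvPartVal).map
    (fun c => c.getD [])).flatten).foldl PySem.Set.add eps)

lemma rhsB_single (s : List Char) (h : ',' ∉ s) (eps : PySem.Set Int) :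
    pvRhsB s eps =
      match pvPartVal s with
      | none => none
      | some v => some (v.foldl PySem.Set.add eps) := by
  rw [pvRhsB, splitOn_no_occ s ',' h]
  cases hpv : pvPartVal s <;> simp [hpv]

lemma rhsB_cons (p t : List Char) (hp : ',' ∉ p) (eps : PySem.Set Int) :
    pvRhsB (p ++ ',' :: t) eps =
      match pvPartVal p with
      | none => none
      | some v => pvRhsB t (v.foldl PySem.Set.add eps) := by
  rw [pvRhsB, splitOn_cons_occ ',' p t hp]
  cases hpv : pvPartVal p with
  | none => simp [hpv]
  | some v =>
    simp only [List.map_cons, List.any_cons, hpv, Option.isNone_some, Bool.false_or]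
    by_cases hany : ((PySem.Chars.splitOn t [',']).map pvPartVal).any Option.isNone = true
    · simp [pvRhsB, hany]
    · simp only [Bool.not_eq_true] at hany
      simp [pvRhsB, hany, List.foldl_append]

-- scan state after one comma-free segment, by the position of its dashes
lemma scan_seg_no_dash (p tail left : List Char) (hc : ',' ∉ p) (hd : '-' ∉ p) :
    pvSegScan (p ++ tail) left none false = pvSegScan tail (left ++ p) none false :=
  scan_plain_left p tail left false hc hd

lemma scan_seg_one_dash (a b tail : List Char) (hc : ',' ∉ (a ++ '-' :: b))
    (hda : '-' ∉ a) (hdb : '-' ∉ b) :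
    pvSegScan ((a ++ '-' :: b) ++ tail) [] none false = pvSegScan tail a (some b) false := by
  have hca : ',' ∉ a := fun e => hc (by simp [e])
  have hcb : ',' ∉ b := fun e => hc (by simp [e])
  rw [List.append_assoc, scan_plain_left a (('-' :: b) ++ tail) [] false hca hda]
  simp only [List.cons_append, List.nil_append]
  rw [show pvSegScan ('-' :: (b ++ tail)) a none false = pvSegScan (b ++ tail) a (some []) false
      from by simp [pvSegScan]]
  rw [scan_plain_right b tail a [] false hcb hdb]
  simp

lemma scan_seg_two_dash (a b tail : List Char) (hc : ',' ∉ (a ++ '-' :: b))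
    (hda : '-' ∉ a) (hdb : '-' ∈ b) :
    (pvSegScan ((a ++ '-' :: b) ++ tail) [] none false).2.2.1 = true := by
  obtain ⟨b1, b2, rfl, hb1⟩ := exists_first_split hdb
  have hca : ',' ∉ a := fun e => hc (by simp [e])
  have hcb1 : ',' ∉ b1 := fun e => hc (by simp [e])
  rw [List.append_assoc, scan_plain_left a (('-' :: (b1 ++ '-' :: b2)) ++ tail) [] false hca hda]
  simp only [List.cons_append, List.nil_append]
  rw [show pvSegScan ('-' :: (b1 ++ '-' :: b2 ++ tail)) a none false =
        pvSegScan (b1 ++ '-' :: b2 ++ tail) a (some []) false from by simp [pvSegScan]]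
  rw [show b1 ++ '-' :: b2 ++ tail = b1 ++ ('-' :: (b2 ++ tail)) from by simp]
  rw [scan_plain_right b1 ('-' :: (b2 ++ tail)) a [] false hcb1 hb1]
  rw [show pvSegScan ('-' :: (b2 ++ tail)) a (some ([] ++ b1)) false =
        pvSegScan (b2 ++ tail) a (some ([] ++ b1)) true from by simp [pvSegScan]]
  exact scan_bad (b2 ++ tail) a (some ([] ++ b1))

-- processing one comma-free segment p followed by tail (either nothing or ',' then
-- the rest): B's step agrees with A's per-part parse
lemma loopB_seg (p tail : List Char) (hc : ',' ∉ p)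
    (htail : tail = [] ∨ ∃ t, tail = ',' :: t) (eps : PySem.Set Int) :
    pvLoopB (p ++ tail) eps =
      if (pvPartVal p).isNone then none
      else
        match pvRem tail with
        | none => some (((pvPartVal p).getD []).foldl PySem.Set.add eps)
        | some t => pvLoopB t (((pvPartVal p).getD []).foldl PySem.Set.add eps) := by
  by_cases hd : '-' ∈ p
  · obtain ⟨a, b, rfl, hda⟩ := exists_first_split hd
    by_cases hdb : '-' ∈ b
    · -- two dashes: bad is set, both sides fail
      rcases hscan : pvSegScan ((a ++ '-' :: b) ++ tail) [] none false with ⟨l', r', bd, rm⟩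
      have hbd := scan_seg_two_dash a b tail hc hda hdb
      rw [hscan] at hbd
      simp only at hbd
      subst hbd
      rw [loopB_step _ eps _ _ _ _ hscan, if_pos rfl]
      rw [partVal_dash _ (by simp), parseRangeA_two_dash a b hda hdb]
      rfl
    · -- exactly one dash: a range segment
      have hscan := scan_seg_one_dash a b tail hc hda hdb
      have hpv : pvPartVal (a ++ '-' :: b) =
          (match PySem.Int.ofChars? a, PySem.Int.ofChars? b with
           | some s, some e => some (PySem.List.pyRange s (e + 1) 1)
           | _, _ => none) := by
        rw [partVal_dash _ (by simp), parseRangeA_one_dash a b hda hdb]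
      rcases htail with rfl | ⟨t, rfl⟩
      · have h2 : pvSegScan ((a ++ '-' :: b) ++ []) [] none false =
            (a, some b, false, none) := by rw [hscan]; rfl
        rw [loopB_step _ eps _ _ _ _ h2, if_neg (by simp)]
        cases hia : PySem.Int.ofChars? a with
        | none => simp [hpv, hia]
        | some lo =>
          cases hib : PySem.Int.ofChars? b with
          | none => simp [hpv, hia, hib]
          | some hi => simp [hpv, hia, hib, pvRem, addRange_eq_foldl]
      · have h2 : pvSegScan ((a ++ '-' :: b) ++ (',' :: t)) [] none false =
            (a, some b, false, some t) := by rw [hscan, scan_comma]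
        rw [loopB_step _ eps _ _ _ _ h2, if_neg (by simp)]
        cases hia : PySem.Int.ofChars? a with
        | none => simp [hpv, hia]
        | some lo =>
          cases hib : PySem.Int.ofChars? b with
          | none => simp [hpv, hia, hib]
          | some hi => simp [hpv, hia, hib, pvRem, addRange_eq_foldl]
  · -- no dash: a single-number segment
    have hscan := scan_seg_no_dash p tail [] hc hd
    simp only [List.nil_append] at hscan
    have hpv := partVal_no_dash p hd
    rcases htail with rfl | ⟨t, rfl⟩
    · have h2 : pvSegScan (p ++ []) [] none false = (p, none, false, none) := by
        rw [hscan]; rfl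
      rw [loopB_step _ eps _ _ _ _ h2, if_neg (by simp)]
      cases hip : PySem.Int.ofChars? p with
      | none => simp [hpv, hip]
      | some m => simp [hpv, hip, pvRem]
    · have h2 : pvSegScan (p ++ (',' :: t)) [] none false = (p, none, false, some t) := by
        rw [hscan, scan_comma]
      rw [loopB_step _ eps _ _ _ _ h2, if_neg (by simp)]
      cases hip : PySem.Int.ofChars? p with
      | none => simp [hpv, hip]
      | some m => simp [hpv, hip, pvRem]

-- ========== main correspondence ==========

lemma loopB_eq_aux : ∀ (n : Nat) (s : List Char), s.length ≤ n →
    ∀ (eps : PySem.Set Int), pvLoopB s eps = pvRhsB s eps := by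
  intro n
  induction n with
  | zero =>
    intro s hs eps
    have : s = [] := List.length_eq_zero_iff.1 (Nat.le_zero.1 hs)
    subst this
    have h := loopB_seg [] [] (by simp) (Or.inl rfl) eps
    simp only [List.append_nil] at h
    rw [h, rhsB_single [] (by simp) eps]
    cases hpv : pvPartVal [] with
    | none => simp
    | some v => simp [show pvRem ([] : List Char) = none from rfl]
  | succ n ih =>
    intro s hs eps
    by_cases hcomma : ',' ∈ s
    · obtain ⟨p, t, rfl, hp⟩ := exists_first_split hcomma
      rw [show p ++ ',' :: t = p ++ (',' :: t) from rfl,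
          loopB_seg p (',' :: t) hp (Or.inr ⟨t, rfl⟩) eps, rhsB_cons p t hp eps]
      cases hpv : pvPartVal p with
      | none => simp
      | some v =>
        simp only [Option.isNone_some, Bool.false_eq_true, if_false, Option.getD_some,
          show pvRem (',' :: t) = some t from by simp [pvRem]]
        exact ih t (by simp at hs; omega) (v.foldl PySem.Set.add eps)
    · have h := loopB_seg s [] hcomma (Or.inl rfl) eps
      rw [List.append_nil] at h
      rw [h, rhsB_single s hcomma eps]
      cases hpv : pvPartVal s with
      | none => simp
      | some v => simp [show pvRem ([] : List Char) = none from rfl]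

lemma loopB_eq (s : List Char) (eps : PySem.Set Int) : pvLoopB s eps = pvRhsB s eps :=
  loopB_eq_aux s.length s le_rfl eps

lemma loopA_eq (parts : List (List Char)) : ∀ acc : List Int,
    pvEpLoopA parts acc =
      if (parts.map pvPartVal).any Option.isNone then none
      else some (acc ++ ((parts.map pvPartVal).map (fun c => c.getD [])).flatten) := by
  induction parts with
  | nil => intro acc; simp [pvEpLoopA]
  | cons p rest ih =>
    intro acc
    by_cases hd : PySem.Chars.isIn ['-'] p = true
    · cases hr : pvParseRangeA p with
      | none => simp [pvEpLoopA, hd, pvPartVal, hr]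
      | some r => simp [pvEpLoopA, hd, pvPartVal, hr, ih]
    · have hd' : PySem.Chars.isIn ['-'] p = false := by simpa using hd
      cases hi : PySem.Int.ofChars? p with
      | none => simp [pvEpLoopA, hd', pvPartVal, hi]
      | some m => simp [pvEpLoopA, hd', pvPartVal, hi, ih]

-- common finish: A's sorted-set postlude equals B's, given the same episode list
lemma finish_eq (l : List Int) :
    (let su := PySem.List.sorted (PySem.Set.ofList l) (fun x => x) false
     if su.isEmpty then [] else su) =
      PySem.List.sorted (l.foldl PySem.Set.add PySem.Set.empty) (fun x => x) false := by
  have hofl : PySem.Set.ofList l = l.foldl PySem.Set.add PySem.Set.empty := rfl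
  rw [← hofl]
  by_cases he : (PySem.List.sorted (PySem.Set.ofList l) (fun x => x) false).isEmpty
  · simp only [he, if_true]
    exact (List.isEmpty_iff.1 he).symm
  · simp [he]

-- both programs reduce to the same middle form
theorem get_episodes_eq_alt (ep : String) : get_episodes ep = get_episodes_alt ep := by
  unfold get_episodes get_episodes_alt
  rw [loopB_eq]
  by_cases hc : PySem.Chars.isIn [','] ep.toList
  · simp only [hc, if_true]
    rw [loopA_eq]
    unfold pvRhsB
    by_cases hany : ((PySem.Chars.splitOn ep.toList [',']).map pvPartVal).any Option.isNone
    · simp [hany]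
    · simp only [hany, Bool.false_eq_true, if_false, List.nil_append]
      exact finish_eq _
  · have hni : ',' ∉ ep.toList := by
      intro hmem
      exact hc ((isIn_singleton ',' ep.toList).2 hmem)
    simp only [hc, Bool.false_eq_true, if_false]
    rw [rhsB_single ep.toList hni]
    by_cases hd : PySem.Chars.isIn ['-'] ep.toList
    · simp only [hd, if_true]
      have hpv : pvPartVal ep.toList = pvParseRangeA ep.toList := by simp [pvPartVal, hd]
      cases hr : pvParseRangeA ep.toList with
      | none => simp [hpv, hr]
      | some r =>
        simp only [hpv, hr]
        exact finish_eq _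
    · simp only [hd, Bool.false_eq_true, if_false]
      have hpv : pvPartVal ep.toList = (PySem.Int.ofChars? ep.toList).map (fun n => [n]) := by
        simp [pvPartVal, hd]
      cases hi : PySem.Int.ofChars? ep.toList with
      | none => simp [hpv, hi]
      | some m =>
        simp only [hpv, hi, Option.map_some]
        exact finish_eq _

-- ===== VERDICT (by name: the statement is the Claim_ definition above) =====
theorem get_episodes_spec : Claim_equal_get_episodes := by
  intro ep _
  unfold Spec_get_episodes
  exact get_episodes_eq_alt ep
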